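-- pv_equiv track=rewrite | github.com/hudulovhamzat0/edu | Codera/Dəst 22/Həll3.py | hudul
-- ===== SOURCE A (Python) =====
-- def hudul(a, b):
--     def ati242(a, b):
--         while b:
--             a, b = b, a % b
--         return a
--
--     ebob_degeri = ati242(a, b)
--     ekob_degeri = a * b // ebob_degeri
--     return ebob_degeri + ekob_degeri
-- ===== SOURCE B (Python) =====
-- def hudul(a, b):
--     def gcd(a, b):
--         return a if b == 0 else gcd(b, a % b)
--
--     g = gcd(a, b)
--     return g + a * b // g
-- ===== Notes on version B (the rewrite author's own statement) =====
-- stated objective: simpler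
-- what changed: A's hand-written iterative Euclidean while-loop over a mutated (a, b) pair is replaced by a one-line recursive gcd helper (same recurrence, recursive decomposition); the lcm and the final sum are then computed directly without intermediate variables.
import Mathlib
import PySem

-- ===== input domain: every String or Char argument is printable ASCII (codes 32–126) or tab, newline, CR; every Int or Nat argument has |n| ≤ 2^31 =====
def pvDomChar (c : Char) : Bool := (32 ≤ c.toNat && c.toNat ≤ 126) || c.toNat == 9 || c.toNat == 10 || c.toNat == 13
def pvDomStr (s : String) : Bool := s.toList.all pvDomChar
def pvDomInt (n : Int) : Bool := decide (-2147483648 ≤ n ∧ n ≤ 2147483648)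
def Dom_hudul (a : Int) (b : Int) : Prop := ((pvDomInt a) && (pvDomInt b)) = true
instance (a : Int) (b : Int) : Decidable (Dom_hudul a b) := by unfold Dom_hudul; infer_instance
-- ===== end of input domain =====

-- B replaces A's iterative Euclidean while-loop with a recursive gcd helper (same recurrence,
-- different decomposition); return value only, no side effects in either program.

-- termination measure for both Euclidean recursions: |a % b| < |b| when b ≠ 0 (Python mod)
theorem pyModNatAbs_lt (a b : Int) (hb : b ≠ 0) : (PySem.Int.mod a b).natAbs < b.natAbs := by
  rcases lt_or_gt_of_ne hb with h | h
  · have := PySem.Int.mod_neg_bounds (a:=a) h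
    omega
  · have h1 := PySem.Int.mod_nonneg (a:=a) h
    have h2 := PySem.Int.mod_lt (a:=a) h
    omega

-- ===== PORT A =====
-- A's 'while b: a, b = b, a % b' as recursion on the loop state pair (a, b)
def ati242 (s : Int × Int) : Int :=
  if h : s.2 = 0 then s.1 else ati242 (s.2, PySem.Int.mod s.1 s.2)
termination_by s.2.natAbs
decreasing_by exact pyModNatAbs_lt s.1 s.2 h

def hudul (a : Int) (b : Int) : Int :=
  let ebob_degeri := ati242 (a, b)
  let ekob_degeri := PySem.Int.floordiv (a * b) ebob_degeri
  ebob_degeri + ekob_degeri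

-- ===== PORT B =====
-- B's recursive helper: gcd a b = a if b == 0 else gcd b (a % b)
def gcdB (a : Int) (b : Int) : Int :=
  if h : b = 0 then a else gcdB b (PySem.Int.mod a b)
termination_by b.natAbs
decreasing_by exact pyModNatAbs_lt a b h

def hudul_alt (a : Int) (b : Int) : Int :=
  gcdB a b + PySem.Int.floordiv (a * b) (gcdB a b)

-- ===== PRECONDITION & SPEC =====
-- Pre_ excludes exactly a = 0 ∧ b = 0, where the Python A (and B) raises ZeroDivisionError.
def Pre_hudul (a : Int) (b : Int) : Prop := ¬ (a = 0 ∧ b = 0)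
instance (a : Int) (b : Int) : Decidable (Pre_hudul a b) := by unfold Pre_hudul; infer_instance
def pvWitness_hudul : Int × Int := (12, 18)

def Spec_hudul (a : Int) (b : Int) (out : Int) : Prop := out = hudul_alt a b
instance (a : Int) (b : Int) (out : Int) : Decidable (Spec_hudul a b out) := by unfold Spec_hudul; infer_instance

-- ===== CLAIM (what is proved, stated in full; the proofs are below) =====
def Claim_equal_hudul : Prop := ∀ (a : Int) (b : Int), Dom_hudul a b → Pre_hudul a b → Spec_hudul a b (hudul a b)

-- ===== LEMMAS AND PROOFS =====
theorem ati242_eq_gcdB (s : Int × Int) : ati242 s = gcdB s.1 s.2 := by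
  induction s using ati242.induct with
  | case1 s h => rw [ati242, gcdB]; simp [h]
  | case2 s h ih => rw [ati242, gcdB]; simp [h]; exact ih

-- ===== VERDICT (by name: the statement is the Claim_ definition above) =====
theorem hudul_spec : Claim_equal_hudul := by
  intro a b _ _
  unfold Spec_hudul hudul hudul_alt
  simp [ati242_eq_gcdB (a, b)]
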